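-- pv_equiv track=rewrite | github.com/Aditya747S/BioToolkit.jl | Examples/Comparison/quality_compare.py | trim_low_quality
-- ===== SOURCE A (Python) =====
-- def phred_scores(quality, offset=33):
--     if quality and isinstance(quality[0], int):
--         return list(quality)
--     return [ord(character) - offset for character in quality]
--
-- def trim_low_quality(record, window=8, threshold=25, offset=33):
--     identifier, sequence, quality = record
--     scores = phred_scores(quality, offset=offset)
--     if len(scores) < window:
--         return None
--
--     first_keep = None
--     last_keep = None
--     threshold_sum = threshold * window
--     window_sum = sum(scores[:window])
--
--     for start in range(0, len(scores) - window + 1):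
--         if start > 0:
--             window_sum += scores[start + window - 1] - scores[start - 1]
--         if window_sum >= threshold_sum:
--             if first_keep is None:
--                 first_keep = start
--             last_keep = start + window - 1
--
--     if first_keep is None:
--         return None
--
--     return identifier, sequence[first_keep:last_keep + 1], quality[first_keep:last_keep + 1]
-- ===== SOURCE B (Python) =====
-- def phred_scores(quality, offset=33):
--     if quality and isinstance(quality[0], int):
--         return list(quality)
--     return [ord(character) - offset for character in quality]
--
-- def trim_low_quality(record, window=8, threshold=25, offset=33):
--     identifier, sequence, quality = record
--     scores = phred_scores(quality, offset=offset)
--     n = len(scores)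
--     if n < window:
--         return None
--     prefix = [0]
--     for score in scores:
--         prefix.append(prefix[-1] + score)
--     need = threshold * window
--     starts = [s for s in range(0, n - window + 1)
--               if prefix[s + window] - prefix[s] >= need]
--     if not starts:
--         return None
--     first_keep = starts[0]
--     last_keep = starts[-1] + window - 1
--     return identifier, sequence[first_keep:last_keep + 1], quality[first_keep:last_keep + 1]
-- ===== Notes on version B (the rewrite author's own statement) =====
-- stated objective: alternative
-- what changed: Replaces the stateful rolling-window accumulator and first/last bookkeeping inside one loop by a prefix-sum array plus a comprehension collecting all qualifying window starts, taking first and last of that list.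
import Mathlib
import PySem

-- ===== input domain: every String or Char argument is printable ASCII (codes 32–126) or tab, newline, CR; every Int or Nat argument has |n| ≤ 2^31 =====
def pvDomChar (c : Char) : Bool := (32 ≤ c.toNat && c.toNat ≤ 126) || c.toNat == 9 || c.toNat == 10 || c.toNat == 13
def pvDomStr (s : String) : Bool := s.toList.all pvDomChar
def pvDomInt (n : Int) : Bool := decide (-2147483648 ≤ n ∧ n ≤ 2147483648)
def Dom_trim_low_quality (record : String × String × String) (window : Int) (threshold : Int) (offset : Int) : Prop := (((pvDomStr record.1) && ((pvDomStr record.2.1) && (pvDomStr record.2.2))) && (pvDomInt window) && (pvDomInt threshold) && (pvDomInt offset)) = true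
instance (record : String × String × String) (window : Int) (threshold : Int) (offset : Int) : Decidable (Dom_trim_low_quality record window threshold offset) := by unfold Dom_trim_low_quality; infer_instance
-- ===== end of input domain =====

-- B replaces A's rolling-window accumulator and in-loop first/last bookkeeping by a prefix-sum
-- array and a filtered list of qualifying window starts (alternative decomposition, same cost).


-- ===== PORT A =====
-- phred_scores (the module helper both A and B call) on a str argument:
-- the isinstance-int branch never fires (chars are not ints)
def pvPhred (quality : List Char) (offset : Int) : List Int :=
  quality.map (fun c => (c.toNat : Int) - offset)

-- the body of A's for-loop, state = (first_keep, last_keep, window_sum)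
def pvStepA (scores : List Int) (window thresholdSum : Int)
    (st : Option Int × Option Int × Int) (start : Int) : Option Int × Option Int × Int :=
  let ws := if 0 < start then
      st.2.2 + PySem.List.pyGetD scores (start + window - 1) 0 - PySem.List.pyGetD scores (start - 1) 0
    else st.2.2
  if thresholdSum ≤ ws then
    ((if st.1 = none then some start else st.1), some (start + window - 1), ws)
  else (st.1, st.2.1, ws)

def trim_low_quality (record : String × String × String) (window : Int) (threshold : Int) (offset : Int) : Option (String × String × String) :=
  let identifier := record.1
  let sequence := record.2.1
  let quality := record.2.2
  let scores := pvPhred quality.toList offset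
  if (scores.length : Int) < window then none else
  let thresholdSum := threshold * window
  let windowSum := (PySem.List.slice scores none (some window)).sum
  let st := (PySem.List.pyRange 0 ((scores.length : Int) - window + 1) 1).foldl
      (pvStepA scores window thresholdSum) (none, none, windowSum)
  match st.1, st.2.1 with
  | some f, some l =>
      some (identifier, PySem.Str.slice sequence (some f) (some (l + 1)),
            PySem.Str.slice quality (some f) (some (l + 1)))
  | _, _ => none

-- ===== PORT B =====
def trim_low_quality_alt (record : String × String × String) (window : Int) (threshold : Int) (offset : Int) : Option (String × String × String) :=
  let identifier := record.1
  let sequence := record.2.1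
  let quality := record.2.2
  let scores := pvPhred quality.toList offset
  let n : Int := scores.length
  if n < window then none else
  let pfx := scores.foldl
      (fun (p : List Int) score => p ++ [PySem.List.pyGetD p (-1) 0 + score]) [0]
  let need := threshold * window
  let starts := (PySem.List.pyRange 0 (n - window + 1) 1).filter
      (fun s => decide (need ≤ PySem.List.pyGetD pfx (s + window) 0 - PySem.List.pyGetD pfx s 0))
  if starts = [] then none else
  let first_keep := PySem.List.pyGetD starts 0 0
  let last_keep := PySem.List.pyGetD starts (-1) 0 + window - 1
  some (identifier, PySem.Str.slice sequence (some first_keep) (some (last_keep + 1)),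
        PySem.Str.slice quality (some first_keep) (some (last_keep + 1)))

-- ===== PRECONDITION & SPEC =====
-- Pre_ excludes window < 0, where A (and B) raise IndexError: A's rolling update reads
-- scores[start + window - 1] past the end of the list on every such call.
def Pre_trim_low_quality (record : String × String × String) (window : Int) (threshold : Int) (offset : Int) : Prop :=
  0 ≤ window
instance (record : String × String × String) (window : Int) (threshold : Int) (offset : Int) : Decidable (Pre_trim_low_quality record window threshold offset) := by unfold Pre_trim_low_quality; infer_instance

def pvWitness_trim_low_quality : (String × String × String) × Int × Int × Int :=
  (("r1", "ACGTACGT", "IIIIIIII"), 4, 25, 33)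

def Spec_trim_low_quality (record : String × String × String) (window : Int) (threshold : Int) (offset : Int) (out : Option (String × String × String)) : Prop := out = trim_low_quality_alt record window threshold offset
instance (record : String × String × String) (window : Int) (threshold : Int) (offset : Int) (out : Option (String × String × String)) : Decidable (Spec_trim_low_quality record window threshold offset out) := by unfold Spec_trim_low_quality; infer_instance

-- ===== CLAIM (what is proved, stated in full; the proofs are below) =====
def Claim_equal_trim_low_quality : Prop := ∀ (record : String × String × String) (window : Int) (threshold : Int) (offset : Int), Dom_trim_low_quality record window threshold offset → Pre_trim_low_quality record window threshold offset → Spec_trim_low_quality record window threshold offset (trim_low_quality record window threshold offset)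

-- ===== LEMMAS AND PROOFS =====

-- sum of the first k scores
def pvPsum (scores : List Int) (k : Nat) : Int := (scores.take k).sum

-- sum of the window of length `window` starting at s
def pvWsum (scores : List Int) (window s : Int) : Int :=
  pvPsum scores (s + window).toNat - pvPsum scores s.toNat

theorem pvPsum_succ (scores : List Int) (k : Nat) (hk : k < scores.length) :
    pvPsum scores (k + 1) = pvPsum scores k + scores[k] := by
  simp only [pvPsum, List.take_add_one, List.getElem?_eq_getElem hk, Option.toList_some,
    List.sum_append, List.sum_cons, List.sum_nil, add_zero]

theorem pv_prefix_eq (scores : List Int) :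
    scores.foldl (fun (p : List Int) score => p ++ [PySem.List.pyGetD p (-1) 0 + score]) [0]
      = (List.range (scores.length + 1)).map (pvPsum scores) := by
  induction scores using List.reverseRecOn with
  | nil => simp [pvPsum]
  | append_singleton l x ih =>
    rw [List.foldl_append, ih]
    have h1 : (List.range (l.length + 1)).map (pvPsum l)
        = (List.range l.length).map (pvPsum l) ++ [pvPsum l l.length] := by
      rw [List.range_succ]; simp
    rw [h1, List.foldl_cons, List.foldl_nil, PySem.List.pyGetD_neg_one_append_singleton]
    have h2 : (l ++ [x]).length + 1 = (l.length + 1) + 1 := by simp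
    rw [h2, List.range_succ, List.map_append]
    have h3 : (List.range (l.length + 1)).map (pvPsum (l ++ [x]))
        = (List.range (l.length + 1)).map (pvPsum l) := by
      apply List.map_congr_left
      intro k hk
      rw [List.mem_range] at hk
      unfold pvPsum
      rw [List.take_append_of_le_length (by omega)]
    rw [h3, h1]
    have h4 : pvPsum (l ++ [x]) (l.length + 1) = pvPsum l l.length + x := by
      unfold pvPsum
      rw [show l.length + 1 = (l ++ [x]).length by simp, List.take_length]
      simp
    simp [h4]

theorem pv_rolling (scores : List Int) (window s : Int) (h0 : 0 ≤ window) (h1 : 1 ≤ s)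
    (h2 : s + window ≤ scores.length) :
    pvWsum scores window (s - 1)
      + PySem.List.pyGetD scores (s + window - 1) 0 - PySem.List.pyGetD scores (s - 1) 0
      = pvWsum scores window s := by
  have hn : s - 1 < (scores.length : Int) := by omega
  rw [PySem.List.pyGetD_eq_getElem scores 0 (by omega) (by omega),
      PySem.List.pyGetD_eq_getElem scores 0 (by omega) (by omega)]
  unfold pvWsum
  have e1 : (s + window).toNat = (s - 1 + window).toNat + 1 := by omega
  have e2 : s.toNat = (s - 1).toNat + 1 := by omega
  rw [e1, e2, pvPsum_succ _ _ (by omega), pvPsum_succ _ _ (by omega)]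
  have e3 : (s + window - 1).toNat = (s - 1 + window).toNat := by omega
  simp only [e3]
  ring

-- A's fold over range(a, m) characterized: first/last components come from the filtered start list
theorem pv_foldA (scores : List Int) (window T : Int) (h0 : 0 ≤ window)
    (k : Nat) :
    ∀ (a : Int) (fk lk : Option Int), 1 ≤ a → a + k = (scores.length : Int) - window + 1 →
    ((PySem.List.pyRange a ((scores.length : Int) - window + 1) 1).foldl
        (pvStepA scores window T) (fk, lk, pvWsum scores window (a - 1))).1
      = (match fk with
         | some x => some x
         | none => ((PySem.List.pyRange a ((scores.length : Int) - window + 1) 1).filter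
                      (fun s => decide (T ≤ pvWsum scores window s))).head?) ∧
    ((PySem.List.pyRange a ((scores.length : Int) - window + 1) 1).foldl
        (pvStepA scores window T) (fk, lk, pvWsum scores window (a - 1))).2.1
      = (match ((PySem.List.pyRange a ((scores.length : Int) - window + 1) 1).filter
                  (fun s => decide (T ≤ pvWsum scores window s))).getLast? with
         | some l => some (l + window - 1)
         | none => lk) := by
  induction k with
  | zero =>
    intro a fk lk ha hm
    rw [PySem.List.pyRange_one_eq_nil (by omega)]
    simp only [List.foldl_nil, List.filter_nil, List.head?_nil, List.getLast?_nil]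
    constructor
    · cases fk <;> rfl
    · trivial
  | succ k ih =>
    intro a fk lk ha hm
    have hab : a < (scores.length : Int) - window + 1 := by omega
    rw [PySem.List.pyRange_one_cons hab, List.foldl_cons, List.filter_cons]
    have hws : pvStepA scores window T (fk, lk, pvWsum scores window (a - 1)) a
        = (if T ≤ pvWsum scores window a then
             ((if fk = none then some a else fk), some (a + window - 1), pvWsum scores window a)
           else (fk, lk, pvWsum scores window a)) := by
      unfold pvStepA
      simp only [if_pos (by omega : (0:Int) < a)]
      rw [pv_rolling scores window a h0 (by omega) (by omega)]
    rw [hws]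
    by_cases hT : T ≤ pvWsum scores window a
    · rw [if_pos hT]
      simp only [decide_eq_true_eq, hT, if_pos]
      have h1 : pvWsum scores window a = pvWsum scores window ((a + 1) - 1) := by norm_num
      rw [h1]
      obtain ⟨ihl, ihr⟩ := ih (a + 1) (if fk = none then some a else fk) (some (a + window - 1))
        (by omega) (by omega)
      rw [ihl, ihr]
      constructor
      · cases fk <;> simp
      · cases hg : ((PySem.List.pyRange (a+1) ((scores.length : Int) - window + 1) 1).filter
            (fun s => decide (T ≤ pvWsum scores window s))).getLast? with
        | none =>
          rw [List.getLast?_eq_none_iff] at hg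
          rw [hg]
          rfl
        | some l =>
          rw [List.getLast?_cons]
          cases hg2 : ((PySem.List.pyRange (a+1) ((scores.length : Int) - window + 1) 1).filter
              (fun s => decide (T ≤ pvWsum scores window s))) with
          | nil => rw [hg2] at hg; simp at hg
          | cons y ys =>
            rw [hg2] at hg
            simp [hg]
    · rw [if_neg hT]
      simp only [decide_eq_true_eq, hT, if_false]
      have h1 : pvWsum scores window a = pvWsum scores window ((a + 1) - 1) := by norm_num
      rw [h1]
      exact ih (a + 1) fk lk (by omega) (by omega)

theorem pv_main (record : String × String × String) (window : Int) (threshold : Int) (offset : Int)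
    (hw : 0 ≤ window) :
    trim_low_quality record window threshold offset = trim_low_quality_alt record window threshold offset := by
  simp only [trim_low_quality, trim_low_quality_alt]
  generalize pvPhred record.2.2.toList offset = scores
  by_cases hlen : (scores.length : Int) < window
  · rw [if_pos hlen, if_pos hlen]
  · rw [if_neg hlen, if_neg hlen]
    set T := threshold * window with hT
    have hfilter : ((PySem.List.pyRange 0 ((scores.length : Int) - window + 1) 1).filter
        (fun s => decide (T ≤ PySem.List.pyGetD (scores.foldl
            (fun (p : List Int) score => p ++ [PySem.List.pyGetD p (-1) 0 + score]) [0]) (s + window) 0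
          - PySem.List.pyGetD (scores.foldl
            (fun (p : List Int) score => p ++ [PySem.List.pyGetD p (-1) 0 + score]) [0]) s 0)))
        = ((PySem.List.pyRange 0 ((scores.length : Int) - window + 1) 1).filter
            (fun s => decide (T ≤ pvWsum scores window s))) := by
      apply List.filter_congr
      intro s hsmem
      rw [PySem.List.mem_pyRange_one] at hsmem
      rw [pv_prefix_eq]
      rw [PySem.List.pyGetD_eq_getElem _ 0 (by omega) (by simp; omega),
          PySem.List.pyGetD_eq_getElem _ 0 (by omega) (by simp; omega)]
      simp only [List.getElem_map, List.getElem_range]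
      rfl
    rw [hfilter]
    have hws0 : (PySem.List.slice scores none (some window)).sum = pvWsum scores window (1 - 1) := by
      rw [PySem.List.slice_to scores hw]
      simp [pvWsum, pvPsum]
    rw [hws0]
    rw [PySem.List.pyRange_one_cons (show (0:Int) < (scores.length : Int) - window + 1 by omega),
        List.foldl_cons, List.filter_cons]
    have hstep0 : pvStepA scores window T (none, none, pvWsum scores window (1 - 1)) 0
        = (if T ≤ pvWsum scores window 0 then
             (some 0, some (0 + window - 1), pvWsum scores window (1 - 1))
           else (none, none, pvWsum scores window (1 - 1))) := by
      unfold pvStepA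
      norm_num
    rw [hstep0]
    simp only [zero_add]
    by_cases h0 : T ≤ pvWsum scores window 0
    · rw [if_pos h0]
      simp only [decide_eq_true_eq, h0, if_pos]
      obtain ⟨hA1, hA2⟩ := pv_foldA scores window T hw
        (((scores.length : Int) - window).toNat) 1 (some 0) (some (0 + window - 1))
        (by omega) (by omega)
      simp only [zero_add] at hA1 hA2
      rw [hA1, hA2]
      cases hg : ((PySem.List.pyRange 1 ((scores.length : Int) - window + 1) 1).filter
          (fun s => decide (T ≤ pvWsum scores window s))).getLast? with
      | none =>
        rw [List.getLast?_eq_none_iff] at hg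
        rw [hg]
        simp [show PySem.List.pyGetD [(0:Int)] (-1) 0 = 0 from rfl]
      | some l =>
        cases hg2 : ((PySem.List.pyRange 1 ((scores.length : Int) - window + 1) 1).filter
            (fun s => decide (T ≤ pvWsum scores window s))) with
        | nil => rw [hg2] at hg; simp at hg
        | cons y ys =>
          rw [hg2] at hg
          have hl : PySem.List.pyGetD (0 :: y :: ys) (-1) 0 = l := by
            rw [PySem.List.pyGetD_neg_one _ _ (by simp),
                List.getLast_cons (by simp)]
            rwa [List.getLast_eq_iff_getLast?_eq_some]
          simp [hl]
    · rw [if_neg h0]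
      simp only [decide_eq_true_eq, h0, if_false]
      obtain ⟨hA1, hA2⟩ := pv_foldA scores window T hw
        (((scores.length : Int) - window).toNat) 1 none none
        (by omega) (by omega)
      rw [hA1, hA2]
      cases hg : ((PySem.List.pyRange 1 ((scores.length : Int) - window + 1) 1).filter
          (fun s => decide (T ≤ pvWsum scores window s))).getLast? with
      | none =>
        rw [List.getLast?_eq_none_iff] at hg
        rw [hg]
        simp
      | some l =>
        cases hg2 : ((PySem.List.pyRange 1 ((scores.length : Int) - window + 1) 1).filter
            (fun s => decide (T ≤ pvWsum scores window s))) with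
        | nil => rw [hg2] at hg; simp at hg
        | cons y ys =>
          rw [hg2] at hg
          have hl : PySem.List.pyGetD (y :: ys) (-1) 0 = l := by
            rw [PySem.List.pyGetD_neg_one _ _ (by simp)]
            rwa [List.getLast_eq_iff_getLast?_eq_some]
          simp [hl]

-- ===== VERDICT (by name: the statement is the Claim_ definition above) =====
theorem trim_low_quality_spec : Claim_equal_trim_low_quality := by
  intro record window threshold offset _ hPre
  exact pv_main record window threshold offset hPre
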